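-- pv_equiv track=rewrite | github.com/RohanAwhad/oc-user-sim | generate_dataset.py | merge_adjacent_same_role_turns
-- ===== SOURCE A (Python) =====
-- def merge_adjacent_same_role_turns(
--     turns: list[dict[str, str]],
-- ) -> list[dict[str, str]]:
--     merged_turns = []
--
--     for turn in turns:
--         if not merged_turns:
--             merged_turns.append(dict(turn))
--             continue
--
--         previous_turn = merged_turns[-1]
--         if previous_turn["role"] != turn["role"]:
--             merged_turns.append(dict(turn))
--             continue
--
--         previous_turn["content"] = f"{previous_turn['content']}\n\n{turn['content']}"
--
--     return merged_turns
-- ===== SOURCE B (Python) =====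
-- def merge_adjacent_same_role_turns(
--     turns: list[dict[str, str]],
-- ) -> list[dict[str, str]]:
--     merged_turns = []
--     i, n = 0, len(turns)
--     while i < n:
--         j = i + 1
--         while j < n and turns[j]["role"] == turns[i]["role"]:
--             j += 1
--         merged = dict(turns[i])
--         if j > i + 1:
--             merged["content"] = "\n\n".join(t["content"] for t in turns[i:j])
--         merged_turns.append(merged)
--         i = j
--     return merged_turns
-- ===== Notes on version B (the rewrite author's own statement) =====
-- stated objective: alternative
-- what changed: B splits the list into maximal same-role runs with a two-pointer scan and builds each output dict once, joining a run's contents with '\n\n'.join (leaving a singleton run's dict untouched), instead of A's fold that repeatedly mutates the 'content' of the accumulator's last dict; Pre_ is exactly A's no-KeyError domain plus, on the Lean side only, unique keys per turn since a duplicate-key association list corresponds to no Python dict input.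
import Mathlib
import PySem

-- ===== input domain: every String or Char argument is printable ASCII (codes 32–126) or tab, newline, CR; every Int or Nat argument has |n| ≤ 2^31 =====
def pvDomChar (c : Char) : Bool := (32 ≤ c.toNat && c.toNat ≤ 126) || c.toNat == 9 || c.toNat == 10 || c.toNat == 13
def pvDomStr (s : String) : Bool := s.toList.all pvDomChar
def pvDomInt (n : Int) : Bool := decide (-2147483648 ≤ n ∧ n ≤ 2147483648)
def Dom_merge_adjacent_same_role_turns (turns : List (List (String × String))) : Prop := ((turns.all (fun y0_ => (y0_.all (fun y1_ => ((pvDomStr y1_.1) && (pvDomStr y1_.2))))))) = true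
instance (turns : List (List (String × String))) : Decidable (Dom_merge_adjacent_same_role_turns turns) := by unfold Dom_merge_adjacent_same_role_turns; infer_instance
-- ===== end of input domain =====

-- B merges each maximal run of same-role turns in one join instead of A's fold that mutates the
-- accumulator's last dict; equivalence is on the return value (neither program mutates its input).

-- ===== PORT A =====
-- Dicts are PySem.Dict over the given association lists ('Dict.mk turn' is the dict 'turn';
-- 'dict(turn)' copies it — exact because Pre_ requires unique keys per turn). A lookup turn["role"]
-- that would raise KeyError reads as "" here; Pre_ excludes exactly those inputs.
def pvMergeGo (merged : List (PySem.Dict String String)) :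
    List (List (String × String)) → List (PySem.Dict String String)
  | [] => merged
  | turn :: rest =>
    match merged.getLast? with
    | none => pvMergeGo (merged ++ [PySem.Dict.mk turn]) rest
    | some previous_turn =>
      if previous_turn.getD "role" "" ≠ (PySem.Dict.mk turn).getD "role" "" then
        pvMergeGo (merged ++ [PySem.Dict.mk turn]) rest
      else
        pvMergeGo (merged.dropLast ++
          [previous_turn.insert "content"
            (previous_turn.getD "content" "" ++ "\n\n" ++ (PySem.Dict.mk turn).getD "content" "")]) rest

def merge_adjacent_same_role_turns (turns : List (List (String × String))) :
    List (List (String × String)) :=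
  (pvMergeGo [] turns).map (·.items)

-- ===== PORT B =====
def pvRole (t : List (String × String)) : String := (PySem.Dict.mk t).getD "role" ""

def pvContent (t : List (String × String)) : String := (PySem.Dict.mk t).getD "content" ""

-- B's outer while-loop walks run starts; the inner 'while j < n and …' scan is the takeWhile,
-- advancing i to j is the dropWhile, and the 'if j > i + 1' guard is the isEmpty test.
def pvAltGo : List (List (String × String)) → List (PySem.Dict String String)
  | [] => []
  | t :: rest =>
    (if (rest.takeWhile (fun u => pvRole u == pvRole t)).isEmpty then PySem.Dict.mk t
     else (PySem.Dict.mk t).insert "content"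
        (PySem.Str.join "\n\n" ((t :: rest.takeWhile (fun u => pvRole u == pvRole t)).map pvContent)))
      :: pvAltGo (rest.dropWhile (fun u => pvRole u == pvRole t))
  termination_by l => l.length
  decreasing_by exact Nat.lt_succ_of_le (List.length_dropWhile_le _ _)

def merge_adjacent_same_role_turns_alt (turns : List (List (String × String))) :
    List (List (String × String)) :=
  (pvAltGo turns).map (·.items)

-- ===== PRECONDITION & SPEC =====
def pvHasKey (t : List (String × String)) (k : String) : Bool := t.any (fun p => p.1 == k)

-- Exactly the inputs on which Python A returns (no KeyError): with two or more turns every turn's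
-- "role" is read, and "content" is read exactly on adjacent same-role pairs; additionally each
-- turn's association list must have unique keys, since a duplicate-key list does not correspond
-- to any Python dict input.
def Pre_merge_adjacent_same_role_turns (turns : List (List (String × String))) : Prop :=
  (∀ t ∈ turns, (t.map Prod.fst).Nodup) ∧
  (2 ≤ turns.length → ∀ t ∈ turns, pvHasKey t "role" = true) ∧
  List.IsChain (fun a b => pvRole a = pvRole b →
    pvHasKey a "content" = true ∧ pvHasKey b "content" = true) turns
instance (turns : List (List (String × String))) : Decidable (Pre_merge_adjacent_same_role_turns turns) := by unfold Pre_merge_adjacent_same_role_turns; infer_instance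

def pvWitness_merge_adjacent_same_role_turns : (List (List (String × String))) :=
  [[("role", "user"), ("content", "hi")],
   [("role", "user"), ("content", "there")],
   [("role", "assistant"), ("content", "ok")]]

def Spec_merge_adjacent_same_role_turns (turns : List (List (String × String))) (out : List (List (String × String))) : Prop := out = merge_adjacent_same_role_turns_alt turns
instance (turns : List (List (String × String))) (out : List (List (String × String))) : Decidable (Spec_merge_adjacent_same_role_turns turns out) := by unfold Spec_merge_adjacent_same_role_turns; infer_instance

-- ===== CLAIM (what is proved, stated in full; the proofs are below) =====
def Claim_equal_merge_adjacent_same_role_turns : Prop := ∀ (turns : List (List (String × String))), Dom_merge_adjacent_same_role_turns turns → Pre_merge_adjacent_same_role_turns turns → Spec_merge_adjacent_same_role_turns turns (merge_adjacent_same_role_turns turns)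

-- ===== LEMMAS AND PROOFS =====

lemma pv_join_cons₂ (a b : String) (l : List String) :
    PySem.Str.join "\n\n" (a :: b :: l) = PySem.Str.join "\n\n" ((a ++ "\n\n" ++ b) :: l) := by
  unfold PySem.Str.join
  congr 1
  cases l with
  | nil => simp [PySem.Chars.join_cons_cons, PySem.Chars.join_singleton]
  | cons c l' => simp [PySem.Chars.join_cons_cons]

-- A's loop never touches the accumulator below its last element
lemma pv_mergeGo_inert (ts : List (List (String × String))) :
    ∀ (acc : List (PySem.Dict String String)) (d : PySem.Dict String String),
      pvMergeGo (acc ++ [d]) ts = acc ++ pvMergeGo [d] ts := by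
  induction ts with
  | nil => intro acc d; rfl
  | cons turn rest ih =>
    intro acc d
    simp only [pvMergeGo, List.getLast?_concat, List.getLast?_singleton,
      List.dropLast_concat, List.dropLast_singleton, List.nil_append]
    split
    · rw [ih (acc ++ [d]), ih [d]]
      simp
    · exact ih acc _

-- Core invariant, both loop states at once: a freshly appended dict (run so far a singleton),
-- and a dict whose "content" has already been rewritten to c.
lemma pv_main (ts : List (List (String × String))) :
    (∀ (t : List (String × String)),
      pvMergeGo [PySem.Dict.mk t] ts = pvAltGo (t :: ts)) ∧
    (∀ (t : List (String × String)) (c : String),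
      pvMergeGo [(PySem.Dict.mk t).insert "content" c] ts =
        ((PySem.Dict.mk t).insert "content"
          (PySem.Str.join "\n\n" (c :: (ts.takeWhile (fun u => pvRole u == pvRole t)).map pvContent)))
        :: pvAltGo (ts.dropWhile (fun u => pvRole u == pvRole t))) := by
  induction ts with
  | nil =>
    constructor
    · intro t; simp [pvMergeGo, pvAltGo]
    · intro t c
      simp only [pvMergeGo, List.takeWhile_nil, List.dropWhile_nil, List.map_nil]
      unfold pvAltGo PySem.Str.join
      simp [PySem.Chars.join_singleton]
  | cons u rest ih =>
    obtain ⟨ih0, ih1⟩ := ih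
    constructor
    · -- fresh leader t, next turn u
      intro t
      by_cases hr : pvRole u = pvRole t
      · simp only [pvMergeGo, List.getLast?_singleton, List.dropLast_singleton, List.nil_append]
        rw [if_neg (by unfold pvRole at hr; rw [hr]; exact fun h => h rfl)]
        rw [ih1 t (_ ++ "\n\n" ++ _)]
        conv_rhs => rw [pvAltGo]
        rw [List.takeWhile_cons_of_pos (by simp [hr]), List.dropWhile_cons_of_pos (by simp [hr])]
        simp only [List.isEmpty_cons, List.map_cons, Bool.false_eq_true, if_false]
        rw [pv_join_cons₂]
        rfl
      · simp only [pvMergeGo, List.getLast?_singleton, List.dropLast_singleton, List.nil_append]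
        rw [if_pos (by unfold pvRole at hr; exact fun h => hr h.symm)]
        rw [pv_mergeGo_inert rest [PySem.Dict.mk t] (PySem.Dict.mk u), ih0 u]
        conv_rhs => rw [pvAltGo]
        rw [List.takeWhile_cons_of_neg (by simp [hr]), List.dropWhile_cons_of_neg (by simp [hr])]
        rfl
    · -- t's content already rewritten to c, next turn u
      intro t c
      have hrole_d : ((PySem.Dict.mk t).insert "content" c).getD "role" "" = pvRole t := by
        rw [PySem.Dict.getD_insert_of_ne _ _ _ (by decide)]; rfl
      by_cases hr : pvRole u = pvRole t
      · simp only [pvMergeGo, List.getLast?_singleton, List.dropLast_singleton, List.nil_append]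
        rw [if_neg (by rw [hrole_d]; unfold pvRole at hr; rw [hr]; exact fun h => h rfl)]
        rw [PySem.Dict.getD_insert_self, PySem.Dict.insert_insert_self]
        rw [ih1 t (c ++ "\n\n" ++ (PySem.Dict.mk u).getD "content" "")]
        rw [List.takeWhile_cons_of_pos (by simp [hr]), List.dropWhile_cons_of_pos (by simp [hr])]
        simp only [List.map_cons]
        rw [pv_join_cons₂]
        rfl
      · simp only [pvMergeGo, List.getLast?_singleton, List.dropLast_singleton, List.nil_append]
        rw [if_pos (by rw [hrole_d]; unfold pvRole at hr; exact fun h => hr h.symm)]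
        rw [pv_mergeGo_inert rest [(PySem.Dict.mk t).insert "content" c] (PySem.Dict.mk u), ih0 u]
        rw [List.takeWhile_cons_of_neg (by simp [hr]), List.dropWhile_cons_of_neg (by simp [hr])]
        simp only [List.map_nil]
        unfold PySem.Str.join
        simp [PySem.Chars.join_singleton]

-- ===== VERDICT (by name: the statement is the Claim_ definition above) =====
theorem merge_adjacent_same_role_turns_spec : Claim_equal_merge_adjacent_same_role_turns := by
  intro turns _ _
  unfold Spec_merge_adjacent_same_role_turns
  cases turns with
  | nil =>
    unfold merge_adjacent_same_role_turns merge_adjacent_same_role_turns_alt pvMergeGo pvAltGo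
    rfl
  | cons t rest =>
    unfold merge_adjacent_same_role_turns merge_adjacent_same_role_turns_alt
    have h0 : pvMergeGo ([] : List (PySem.Dict String String)) (t :: rest)
        = pvMergeGo [PySem.Dict.mk t] rest := rfl
    rw [h0, (pv_main rest).1 t]
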